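-- pv_equiv track=rewrite | github.com/grapatin/AOC2021 | src/day17/day17.py | calculate_x_steps
-- ===== SOURCE A (Python) =====
-- def calculate_x_steps(start_x_vel):
--     start_x = 0
--     current_x_pos = start_x
--     current_x_vel = start_x_vel
--     pos_x_list = [start_x]
--     while (current_x_vel != 0):
--         current_x_pos += current_x_vel
--         current_x_vel -= 1
--         pos_x_list.append(current_x_pos)
--
--     return pos_x_list
-- ===== SOURCE B (Python) =====
-- def calculate_x_steps(start_x_vel):
--     # Closed form: after k steps the position is the sum of the arithmetic
--     # series start_x_vel, start_x_vel-1, ..., down to start_x_vel-k+1,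
--     # i.e. k*start_x_vel minus the (k-1)-th triangular number.
--     return [k * start_x_vel - k * (k - 1) // 2 for k in range(start_x_vel + 1)]
-- ===== Notes on version B (the rewrite author's own statement) =====
-- stated objective: alternative
-- what changed: Replaces A's stateful while-loop accumulator with a direct closed form: each entry is computed independently from its index as k*start_x_vel minus the (k-1)-th triangular number, with no running state.
import Mathlib
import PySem

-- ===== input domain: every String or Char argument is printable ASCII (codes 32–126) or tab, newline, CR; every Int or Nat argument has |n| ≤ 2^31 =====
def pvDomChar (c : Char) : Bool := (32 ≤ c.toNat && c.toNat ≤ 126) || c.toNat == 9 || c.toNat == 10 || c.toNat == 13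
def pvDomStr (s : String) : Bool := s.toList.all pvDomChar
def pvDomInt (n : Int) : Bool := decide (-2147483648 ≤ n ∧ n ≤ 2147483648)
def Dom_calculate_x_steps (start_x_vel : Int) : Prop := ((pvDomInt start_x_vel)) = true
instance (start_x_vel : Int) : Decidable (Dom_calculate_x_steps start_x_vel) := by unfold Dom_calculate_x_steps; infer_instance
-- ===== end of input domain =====

-- B replaces A's stateful while-loop with a per-index closed form (k times the velocity minus a triangular number) — a different algorithm, same cost.
-- Pre_ excludes negative start_x_vel, on which A's while-loop never terminates (it returns no value there).


-- ===== PORT A =====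
-- A's while-loop: state (current_x_pos, current_x_vel, pos_x_list); exact for current_x_vel ≥ 0
-- (for negative velocity Python diverges, which Pre_ excludes; the Lean loop stops there).
def calcXLoopA (pos v : Int) (acc : List Int) : List Int :=
  if _h : 0 < v then calcXLoopA (pos + v) (v - 1) (acc ++ [pos + v]) else acc
termination_by v.toNat
decreasing_by omega

def calculate_x_steps (start_x_vel : Int) : List Int :=
  calcXLoopA 0 start_x_vel [0]

-- ===== PORT B =====
-- closed form: the k-th entry is k*v - k*(k-1)//2
def calculate_x_steps_alt (start_x_vel : Int) : List Int :=
  (PySem.List.pyRange 0 (start_x_vel + 1) 1).map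
    (fun k => k * start_x_vel - PySem.Int.floordiv (k * (k - 1)) 2)

-- ===== PRECONDITION & SPEC =====
-- Pre_ excludes negative start_x_vel: there A's while-loop runs forever (no return value).
def Pre_calculate_x_steps (start_x_vel : Int) : Prop := 0 ≤ start_x_vel
instance (start_x_vel : Int) : Decidable (Pre_calculate_x_steps start_x_vel) := by unfold Pre_calculate_x_steps; infer_instance
def pvWitness_calculate_x_steps : Int := 5

def Spec_calculate_x_steps (start_x_vel : Int) (out : List Int) : Prop := out = calculate_x_steps_alt start_x_vel
instance (start_x_vel : Int) (out : List Int) : Decidable (Spec_calculate_x_steps start_x_vel out) := by unfold Spec_calculate_x_steps; infer_instance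

-- ===== CLAIM (what is proved, stated in full; the proofs are below) =====
def Claim_equal_calculate_x_steps : Prop := ∀ (start_x_vel : Int), Dom_calculate_x_steps start_x_vel → Pre_calculate_x_steps start_x_vel → Spec_calculate_x_steps start_x_vel (calculate_x_steps start_x_vel)

-- ===== LEMMAS AND PROOFS =====
-- abbreviation for B's closed form
def gForm (v k : Int) : Int := k * v - PySem.Int.floordiv (k * (k - 1)) 2

theorem gForm_step (n k : Int) : gForm (n + 1) (k + 1) = (n + 1) + gForm n k := by
  unfold gForm
  have h2 : (0:Int) < 2 := by norm_num
  rw [PySem.Int.floordiv_eq_ediv_of_pos h2, PySem.Int.floordiv_eq_ediv_of_pos h2]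
  have he : (k + 1) * (k + 1 - 1) = k * (k - 1) + k * 2 := by ring
  rw [he, Int.add_mul_ediv_right _ _ (by norm_num : (2:Int) ≠ 0)]
  ring

theorem calcXLoopA_eq_closed (v : Int) (hv : 0 ≤ v) :
    ∀ (pos : Int) (acc : List Int),
      calcXLoopA pos v acc
        = acc ++ (List.range v.toNat).map (fun i : Nat => pos + gForm v ((i : Int) + 1)) := by
  induction v, hv using Int.le_induction with
  | base =>
    intro pos acc
    rw [calcXLoopA]
    norm_num
  | succ n hn ih =>
    intro pos acc
    rw [calcXLoopA, dif_pos (by omega : (0:Int) < n + 1)]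
    have h1 : n + 1 - 1 = n := by omega
    rw [h1, ih]
    have ht : (n + 1).toNat = n.toNat + 1 := by omega
    rw [ht, List.range_succ_eq_map]
    simp only [List.map_cons, List.map_map]
    have h0 : pos + gForm (n + 1) (((0 : Nat) : Int) + 1) = pos + (n + 1) := by
      unfold gForm
      norm_num [PySem.Int.floordiv]
    rw [h0]
    have hfun :
        ((fun i : Nat => pos + gForm (n + 1) ((i : Int) + 1)) ∘ Nat.succ)
          = fun i : Nat => pos + (n + 1) + gForm n ((i : Int) + 1) := by
      funext i
      simp only [Function.comp]
      have : ((Nat.succ i : Nat) : Int) + 1 = ((i : Int) + 1) + 1 := by push_cast; ring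
      rw [this, gForm_step]
      ring
    rw [hfun]
    simp

theorem alt_eq_closed (v : Int) (hv : 0 ≤ v) :
    calculate_x_steps_alt v
      = 0 :: (List.range v.toNat).map (fun i : Nat => gForm v ((i : Int) + 1)) := by
  unfold calculate_x_steps_alt
  rw [PySem.List.pyRange_one]
  have ht : (v + 1 - 0).toNat = v.toNat + 1 := by omega
  rw [ht, List.range_succ_eq_map, List.map_cons, List.map_cons, List.map_map, List.map_map]
  congr 1
  · show (0 + ((0 : Nat) : Int)) * v
        - PySem.Int.floordiv ((0 + ((0 : Nat) : Int)) * (0 + ((0 : Nat) : Int) - 1)) 2 = 0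
    norm_num [PySem.Int.floordiv]
  · apply List.map_congr_left
    intro i _
    show (0 + ((Nat.succ i : Nat) : Int)) * v
        - PySem.Int.floordiv ((0 + ((Nat.succ i : Nat) : Int)) * (0 + ((Nat.succ i : Nat) : Int) - 1)) 2
        = gForm v ((i : Int) + 1)
    have hc : (0 : Int) + ((Nat.succ i : Nat) : Int) = (i : Int) + 1 := by push_cast; ring
    rw [hc]
    rfl

-- ===== VERDICT (by name: the statement is the Claim_ definition above) =====
theorem calculate_x_steps_spec : Claim_equal_calculate_x_steps := by
  intro v _ hpre
  have hv : (0 : Int) ≤ v := hpre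
  unfold Spec_calculate_x_steps calculate_x_steps
  rw [calcXLoopA_eq_closed v hv, alt_eq_closed v hv]
  simp
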